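-- pv_equiv track=rewrite | github.com/amir-f34/SublimeAlgo | server/tasks/task05/task.py | parse_genes
-- ===== SOURCE A (Python) =====
-- def parse_genes(chromosome):
--     genes = list()
--     i = 0
--     while i < len(chromosome):
--         char = chromosome[i]
--         if char in "abcdefghijk":
--             genes.append(char)
--             i += 1
--         elif char == "s":
--             genes.append(chromosome[i : i + 3])
--             i += 3
--         else:
--             i += 1
--     return genes
-- ===== SOURCE B (Python) =====
-- def parse_genes(chromosome):
--     genes = []
--     pending = None
--     for c in chromosome:
--         if pending is not None:
--             pending += c
--             if len(pending) == 3: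
--                 genes.append(pending)
--                 pending = None
--         elif c == "s":
--             pending = "s"
--         elif "a" <= c <= "k":
--             genes.append(c)
--     if pending is not None:
--         genes.append(pending)
--     return genes
-- ===== Notes on version B (the rewrite author's own statement) =====
-- stated objective: alternative
-- what changed: Replaced the index-based while loop with slicing and manual index jumps (i += 1 / i += 3) by a single for-each pass over the characters driving a small state machine that accumulates a pending s-gene buffer and flushes it when full (or at end of string).
import Mathlib
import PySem

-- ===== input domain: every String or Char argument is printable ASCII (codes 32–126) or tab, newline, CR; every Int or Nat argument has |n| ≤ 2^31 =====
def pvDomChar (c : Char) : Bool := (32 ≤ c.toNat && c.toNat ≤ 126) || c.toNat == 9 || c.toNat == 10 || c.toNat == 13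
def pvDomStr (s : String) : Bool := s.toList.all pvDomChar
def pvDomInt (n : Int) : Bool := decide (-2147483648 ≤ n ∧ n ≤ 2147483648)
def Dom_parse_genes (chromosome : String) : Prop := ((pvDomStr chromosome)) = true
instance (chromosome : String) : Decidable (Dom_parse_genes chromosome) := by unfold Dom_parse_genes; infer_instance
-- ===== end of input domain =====

-- B replaces A's index/slice while-loop by a one-pass for-each state machine with a pending s-gene buffer (alternative decomposition, same cost).


-- ===== PORT A =====
-- while-loop of A: state is (genes, i); chromosome[i:i+3] is PySem.List.slice
def parseALoop (cs : List Char) (genes : List String) (i : Nat) : List String :=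
  if h : i < cs.length then
    let char := cs[i]
    if char ∈ "abcdefghijk".toList then
      parseALoop cs (genes ++ [String.ofList [char]]) (i + 1)
    else if char = 's' then
      parseALoop cs (genes ++ [String.ofList (PySem.List.slice cs (some (i : Int)) (some ((i : Int) + 3)))]) (i + 3)
    else
      parseALoop cs genes (i + 1)
  else genes
termination_by cs.length - i
decreasing_by all_goals omega

def parse_genes (chromosome : String) : List String :=
  parseALoop chromosome.toList [] 0

-- ===== PORT B =====
-- one step of B's for-loop: state is (genes, pending)
def parseBStep (st : List String × Option (List Char)) (c : Char) : List String × Option (List Char) :=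
  match st with
  | (genes, some p) =>
      let p' := p ++ [c]
      if p'.length = 3 then (genes ++ [String.ofList p'], none) else (genes, some p')
  | (genes, none) =>
      if c = 's' then (genes, some ['s'])
      else if 'a' ≤ c ∧ c ≤ 'k' then (genes ++ [String.ofList [c]], none)
      else (genes, none)

-- B's trailing 'if pending is not None: genes.append(pending)'
def parseBFinish (st : List String × Option (List Char)) : List String :=
  match st with
  | (genes, none) => genes
  | (genes, some p) => genes ++ [String.ofList p]

def parse_genes_alt (chromosome : String) : List String :=
  parseBFinish (chromosome.toList.foldl parseBStep ([], none))

-- ===== PRECONDITION & SPEC =====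
def Spec_parse_genes (chromosome : String) (out : List String) : Prop := out = parse_genes_alt chromosome
instance (chromosome : String) (out : List String) : Decidable (Spec_parse_genes chromosome out) := by unfold Spec_parse_genes; infer_instance

-- ===== CLAIM (what is proved, stated in full; the proofs are below) =====
def Claim_equal_parse_genes : Prop := ∀ (chromosome : String), Dom_parse_genes chromosome → Spec_parse_genes chromosome (parse_genes chromosome)

-- ===== LEMMAS AND PROOFS =====

-- A's loop restated structurally on the not-yet-scanned suffix
def parseAList : List Char → List String → List String
  | [], genes => genes
  | c :: rest, genes =>
      if c ∈ "abcdefghijk".toList then parseAList rest (genes ++ [String.ofList [c]])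
      else if c = 's' then parseAList (rest.drop 2) (genes ++ [String.ofList (c :: rest.take 2)])
      else parseAList rest genes
termination_by l _ => l.length
decreasing_by all_goals (simp [List.length_drop]; try omega)

lemma mem_gene_chars_iff (c : Char) : c ∈ "abcdefghijk".toList ↔ ('a' ≤ c ∧ c ≤ 'k') := by
  have h : "abcdefghijk".toList = ['a','b','c','d','e','f','g','h','i','j','k'] := by decide
  rw [h]
  simp [List.mem_cons, Char.ext_iff, Char.le_def, UInt32.le_iff_toNat_le, UInt32.ext_iff]
  omega

lemma parseALoop_eq_list_aux (n : Nat) : ∀ (cs : List Char) (genes : List String) (i : Nat),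
    cs.length - i ≤ n → parseALoop cs genes i = parseAList (cs.drop i) genes := by
  induction n with
  | zero =>
    intro cs genes i h
    have hge : cs.length ≤ i := by omega
    rw [parseALoop]
    rw [dif_neg (by omega), List.drop_eq_nil_of_le hge, parseAList]
  | succ n ih =>
    intro cs genes i h
    rw [parseALoop]
    by_cases hlt : i < cs.length
    · rw [dif_pos hlt]
      have hdrop : cs.drop i = cs[i] :: cs.drop (i + 1) := List.drop_eq_getElem_cons hlt
      rw [hdrop, parseAList]
      by_cases hm : cs[i] ∈ "abcdefghijk".toList
      · rw [if_pos hm, if_pos hm, ih cs _ (i + 1) (by omega)]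
      · rw [if_neg hm, if_neg hm]
        by_cases hs : cs[i] = 's'
        · rw [if_pos hs, if_pos hs]
          have hcast : ((i : Int) + 3) = (((i + 3 : Nat)) : Int) := by push_cast; ring
          have hslice : PySem.List.slice cs (some (i : Int)) (some ((i : Int) + 3))
              = cs[i] :: (cs.drop (i + 1)).take 2 := by
            rw [hcast, PySem.List.slice_natCast]
            have : i + 3 - i = 3 := by omega
            rw [this, hdrop]
            rfl
          rw [hslice, ih cs _ (i + 3) (by omega)]
          have : (cs.drop (i + 1)).drop 2 = cs.drop (i + 3) := by
            rw [List.drop_drop]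
          rw [this]
        · rw [if_neg hs, if_neg hs, ih cs _ (i + 1) (by omega)]
    · rw [dif_neg hlt, List.drop_eq_nil_of_le (by omega), parseAList]

lemma parseALoop_eq_list (cs : List Char) (genes : List String) (i : Nat) :
    parseALoop cs genes i = parseAList (cs.drop i) genes :=
  parseALoop_eq_list_aux (cs.length - i) cs genes i le_rfl

lemma parseBStep_none_s (genes : List String) : parseBStep (genes, none) 's' = (genes, some ['s']) := by
  simp [parseBStep]

lemma parseBStep_none_letter (genes : List String) (c : Char) (h1 : c ≠ 's') (h2 : 'a' ≤ c ∧ c ≤ 'k') :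
    parseBStep (genes, none) c = (genes ++ [String.ofList [c]], none) := by
  simp [parseBStep, h1, h2]

lemma parseBStep_none_other (genes : List String) (c : Char) (h1 : c ≠ 's') (h2 : ¬ ('a' ≤ c ∧ c ≤ 'k')) :
    parseBStep (genes, none) c = (genes, none) := by
  simp [parseBStep, h1, h2]

lemma parseBStep_some_one (genes : List String) (c : Char) :
    parseBStep (genes, some ['s']) c = (genes, some ['s', c]) := by
  simp [parseBStep]

lemma parseBStep_some_two (genes : List String) (c1 c : Char) :
    parseBStep (genes, some ['s', c1]) c = (genes ++ [String.ofList ['s', c1, c]], none) := by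
  simp [parseBStep]

lemma parseAList_eq_fold_aux (n : Nat) : ∀ (l : List Char) (genes : List String),
    l.length ≤ n → parseAList l genes = parseBFinish (l.foldl parseBStep (genes, none)) := by
  induction n with
  | zero =>
    intro l genes h
    have : l = [] := List.eq_nil_of_length_eq_zero (by omega)
    subst this
    simp [parseAList, parseBFinish]
  | succ n ih =>
    intro l genes h
    match l with
    | [] => simp [parseAList, parseBFinish]
    | c :: rest =>
      rw [parseAList, List.foldl_cons]
      by_cases hm : c ∈ "abcdefghijk".toList
      · have hck := (mem_gene_chars_iff c).1 hm
        have hcs : c ≠ 's' := by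
          intro hc; subst hc; exact absurd hm (by decide)
        rw [if_pos hm, parseBStep_none_letter genes c hcs hck]
        exact ih rest _ (by simpa using Nat.le_of_succ_le_succ h)
      · rw [if_neg hm]
        by_cases hs : c = 's'
        · subst hs
          rw [if_pos rfl, parseBStep_none_s]
          match rest with
          | [] => simp [parseAList, parseBFinish]
          | [c1] =>
            rw [List.foldl_cons, parseBStep_some_one, List.foldl_nil]
            simp [parseAList, parseBFinish]
          | c1 :: c2 :: r =>
            rw [List.foldl_cons, parseBStep_some_one, List.foldl_cons, parseBStep_some_two]
            simp only [List.drop_succ_cons, List.drop_zero, List.take_succ_cons, List.take_zero]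
            exact ih r _ (by simp at h ⊢; omega)
        · rw [if_neg hs]
          have hnk : ¬ ('a' ≤ c ∧ c ≤ 'k') := fun hc => hm ((mem_gene_chars_iff c).2 hc)
          rw [parseBStep_none_other genes c hs hnk]
          exact ih rest _ (by simpa using Nat.le_of_succ_le_succ h)

lemma parseAList_eq_fold (l : List Char) (genes : List String) :
    parseAList l genes = parseBFinish (l.foldl parseBStep (genes, none)) :=
  parseAList_eq_fold_aux l.length l genes le_rfl

-- ===== VERDICT (by name: the statement is the Claim_ definition above) =====
theorem parse_genes_spec : Claim_equal_parse_genes := by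
  intro s _
  unfold Spec_parse_genes parse_genes parse_genes_alt
  rw [parseALoop_eq_list, List.drop_zero, parseAList_eq_fold]
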